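-- pv_equiv track=rewrite | github.com/pBogey/hello-world | 08. Strings/CountWords.py | count_words_e
-- ===== SOURCE A (Python) =====
-- punctuation = "~!@#$%^&*()_-=+[{]}\\|'\";:,<.>/?"
--
-- def remove_punctuation(text):
--     text_wo_punctuation = ""
--     for word in text:
--         if word not in punctuation:
--             text_wo_punctuation += word
--     return text_wo_punctuation
--
-- def count_words_e(text):
--     words = remove_punctuation(text).lower().split()
--     word_no_e = 0
--     for word in words:
--         if "e" in word:
--             word_no_e += 1
--         else:
--             continue
--     return word_no_e
-- ===== SOURCE B (Python) =====
-- punctuation = "~!@#$%^&*()_-=+[{]}\\|'\";:,<.>/?"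
--
-- def count_words_e(text):
--     # single pass: fuse punctuation removal, lowering, splitting and counting
--     count = 0
--     open_tok = False
--     has_e = False
--     for ch in text:
--         if ch in punctuation:
--             continue
--         if ch.isspace():
--             if open_tok and has_e:
--                 count += 1
--             open_tok = False
--             has_e = False
--         else:
--             open_tok = True
--             if ch.lower() == 'e':
--                 has_e = True
--     if open_tok and has_e:
--         count += 1
--     return count
-- ===== Notes on version B (the rewrite author's own statement) =====
-- stated objective: alternative
-- what changed: Replaced the three-pass pipeline (build a punctuation-free string, lowercase it, split it, then count) by a single scan over the characters maintaining a token-open flag and a has-e flag, with no intermediate strings.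
import Mathlib
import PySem

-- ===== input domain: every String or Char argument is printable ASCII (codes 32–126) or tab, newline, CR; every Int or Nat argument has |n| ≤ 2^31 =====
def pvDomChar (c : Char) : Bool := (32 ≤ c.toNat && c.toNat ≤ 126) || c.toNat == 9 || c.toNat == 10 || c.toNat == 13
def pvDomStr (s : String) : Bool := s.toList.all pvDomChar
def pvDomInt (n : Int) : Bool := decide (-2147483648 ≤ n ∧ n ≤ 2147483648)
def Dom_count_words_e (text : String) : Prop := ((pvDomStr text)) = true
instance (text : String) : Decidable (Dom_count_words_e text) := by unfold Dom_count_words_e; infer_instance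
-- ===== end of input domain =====

-- B fuses A's remove-punctuation / lowercase / split / count pipeline into one scan with two flags; return values proved equal on Dom.

def pvPunct : List Char := "~!@#$%^&*()_-=+[{]}\\|'\";:,<.>/?".toList

-- ===== PORT A =====
-- for word in text: if word not in punctuation: text_wo_punctuation += word
def remove_punctuation (text : String) : String :=
  String.ofList (text.toList.foldl
    (fun acc c => if !PySem.Chars.isIn [c] pvPunct then acc ++ [c] else acc) [])

def count_words_e (text : String) : Int :=
  let words := PySem.Str.split₀ (PySem.Str.lower (remove_punctuation text))
  words.foldl (fun n w => if PySem.Str.isIn "e" w then n + 1 else n) 0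

-- ===== PORT B =====
-- single pass; state = (count, token-open flag, token-has-e flag)
def count_words_e_alt (text : String) : Int :=
  let st := text.toList.foldl
    (fun st c =>
      if PySem.Chars.isIn [c] pvPunct then st
      else if PySem.Chars.isspace c then
        (if st.2.1 && st.2.2 then st.1 + 1 else st.1, false, false)
      else (st.1, true, st.2.2 || (PySem.Chars.lowerChar c == 'e')))
    ((0 : Int), false, false)
  if st.2.1 && st.2.2 then st.1 + 1 else st.1

-- ===== PRECONDITION & SPEC =====
def Spec_count_words_e (text : String) (out : Int) : Prop := out = count_words_e_alt text
instance (text : String) (out : Int) : Decidable (Spec_count_words_e text out) := by unfold Spec_count_words_e; infer_instance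

-- ===== CLAIM (what is proved, stated in full; the proofs are below) =====
def Claim_equal_count_words_e : Prop := ∀ (text : String), Dom_count_words_e text → Spec_count_words_e text (count_words_e text)

-- ===== LEMMAS AND PROOFS =====

-- definitional equations, so proofs never unfold the brecOn bodies directly
theorem fgo_cons (c h : Char) (t : List Char) (k : Nat) :
    PySem.Chars.find.go [c] (h :: t) k
      = if [c].isPrefixOf (h :: t) then ↑k else PySem.Chars.find.go [c] t (k + 1) := rfl

theorem go_nil (cur : List Char) (acc : List (List Char)) :
    PySem.Chars.split₀.go [] cur acc
      = if cur.isEmpty then acc.reverse else (cur.reverse :: acc).reverse := rfl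

theorem go_cons (c : Char) (rest cur : List Char) (acc : List (List Char)) :
    PySem.Chars.split₀.go (c :: rest) cur acc
      = if PySem.Chars.isspace c then
          (if cur.isEmpty then PySem.Chars.split₀.go rest [] acc
           else PySem.Chars.split₀.go rest [] (cur.reverse :: acc))
        else PySem.Chars.split₀.go rest (c :: cur) acc := rfl

-- `c in s` for a one-character string is char membership
theorem findgo_singleton (c : Char) (s : List Char) (k : Nat) :
    (PySem.Chars.find.go [c] s k != -1) = s.contains c := by
  induction s generalizing k with
  | nil => rfl
  | cons h t ih =>
    rw [fgo_cons]
    by_cases hc : c == h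
    · have hch : c = h := by simpa using hc
      subst hch
      simp [List.isPrefixOf]
    · simp [List.isPrefixOf, hc, ih]
      simp_all

theorem isIn_singleton (c : Char) (s : List Char) :
    PySem.Chars.isIn [c] s = s.contains c := by
  simp [PySem.Chars.isIn, PySem.Chars.find, findgo_singleton]

-- lowering a character never changes whether it is whitespace
theorem isspace_false_of (d : Char) (h1 : 65 ≤ d.toNat) (h2 : d.toNat ≤ 122) :
    PySem.Chars.isspace d = false := by
  rw [Bool.eq_false_iff]
  intro htr
  simp only [PySem.Chars.isspace, Bool.or_eq_true, Bool.and_eq_true,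
    decide_eq_true_eq] at htr
  omega

theorem isspace_lowerChar (c : Char) :
    PySem.Chars.isspace (PySem.Chars.lowerChar c) = PySem.Chars.isspace c := by
  by_cases hu : PySem.Chars.isupper c = true
  · have hb : 65 ≤ c.toNat ∧ c.toNat ≤ 90 := by
      simpa [PySem.Chars.isupper, Char.le_def] using hu
    have hv : (c.toNat + 32).isValidChar := Or.inl (by omega)
    have ht : (Char.ofNat (c.toNat + 32)).toNat = c.toNat + 32 := by
      simp [Char.ofNat, hv, Char.toNat_ofNatAux]
    unfold PySem.Chars.lowerChar
    rw [if_pos hu,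
      isspace_false_of (Char.ofNat (c.toNat + 32)) (by rw [ht]; omega) (by rw [ht]; omega),
      isspace_false_of c (by omega) (by omega)]
  · unfold PySem.Chars.lowerChar
    rw [if_neg hu]

def pvStepG (st : Int × Bool × Bool) (c : Char) : Int × Bool × Bool :=
  if PySem.Chars.isspace c then
    (if st.2.1 && st.2.2 then st.1 + 1 else st.1, false, false)
  else (st.1, true, st.2.2 || (c == 'e'))

def pvClose (st : Int × Bool × Bool) : Int := if st.2.1 && st.2.2 then st.1 + 1 else st.1

def pvCountE (ws : List (List Char)) : Int := (ws.countP (fun w => w.contains 'e') : Nat)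

-- B's fold over the raw text equals the pvStepG fold over the filtered, lowered text
theorem foldB_eq_foldG (l : List Char) (st : Int × Bool × Bool) :
    l.foldl
      (fun st c =>
        if PySem.Chars.isIn [c] pvPunct then st
        else if PySem.Chars.isspace c then
          (if st.2.1 && st.2.2 then st.1 + 1 else st.1, false, false)
        else (st.1, true, st.2.2 || (PySem.Chars.lowerChar c == 'e')))
      st
    = ((l.filter (fun c => !PySem.Chars.isIn [c] pvPunct)).map PySem.Chars.lowerChar).foldl
        pvStepG st := by
  induction l generalizing st with
  | nil => rfl
  | cons c t ih =>
    simp only [List.foldl_cons, List.filter_cons]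
    by_cases hp : PySem.Chars.isIn [c] pvPunct = true
    · simp only [hp, if_true, Bool.not_true, Bool.false_eq_true, if_false]
      exact ih st
    · have hp' : PySem.Chars.isIn [c] pvPunct = false := by simpa using hp
      simp only [hp', Bool.false_eq_true, if_false, Bool.not_false, if_true,
        List.map_cons, List.foldl_cons, pvStepG, isspace_lowerChar c]
      exact ih _

-- closing the current token adds its contribution to the count
theorem pvCountE_close (cur : List Char) (acc : List (List Char)) :
    (if (!cur.isEmpty && cur.contains 'e') = true then pvCountE acc + 1 else pvCountE acc)
      = pvCountE (if cur.isEmpty = true then acc else cur.reverse :: acc) := by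
  by_cases hc : cur.isEmpty
  · simp [hc]
  · have hc' : cur.isEmpty = false := by simpa using hc
    simp only [hc', Bool.not_false, Bool.true_and, Bool.false_eq_true, if_false,
      pvCountE, List.countP_cons, List.contains_reverse]
    by_cases he : 'e' ∈ cur <;> simp [he]

-- main invariant: the single-pass state tracks split₀.go's accumulator
theorem foldG_split (l : List Char) (cur : List Char) (acc : List (List Char)) :
    pvClose (l.foldl pvStepG (pvCountE acc, !cur.isEmpty, cur.contains 'e'))
      = pvCountE (PySem.Chars.split₀.go l cur acc) := by
  induction l generalizing cur acc with
  | nil =>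
    rw [List.foldl_nil, go_nil]
    have hgo : pvCountE (if cur.isEmpty then acc.reverse else (cur.reverse :: acc).reverse)
        = pvCountE (if cur.isEmpty = true then acc else cur.reverse :: acc) := by
      by_cases hc : cur.isEmpty
      · simp [hc, pvCountE, List.countP_reverse]
      · by_cases he : 'e' ∈ cur <;>
          simp [hc, he, pvCountE, List.countP_reverse]
    rw [hgo, ← pvCountE_close]
    rfl
  | cons c t ih =>
    rw [List.foldl_cons, go_cons]
    simp only [pvStepG]
    by_cases hs : PySem.Chars.isspace c = true
    · rw [if_pos hs, if_pos hs]
      by_cases hc : cur.isEmpty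
      · have hcur : cur = [] := List.isEmpty_iff.mp hc
        subst hcur
        simpa using ih [] acc
      · rw [if_neg hc]
        have h1 := ih [] (cur.reverse :: acc)
        simp only [List.isEmpty_nil, Bool.not_true, List.contains_nil] at h1
        rw [← h1]
        congr 2
        rw [pvCountE_close, if_neg hc]
    · rw [if_neg hs, if_neg hs]
      have h1 := ih (c :: cur) acc
      simp only [List.isEmpty_cons, List.contains_cons, Bool.not_false] at h1
      rw [← h1]
      congr 2
      cases h2 : cur.contains 'e' <;> simp [eq_comm]

theorem foldl_count_if {α : Type} (p : α → Bool) (l : List α) (s : Int) :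
    l.foldl (fun n w => if p w then n + 1 else n) s = s + (l.countP p : Nat) := by
  induction l generalizing s with
  | nil => simp
  | cons w t ih =>
    by_cases h : p w <;> simp [h, ih] <;> ring

-- ===== VERDICT (by name: the statement is the Claim_ definition above) =====
theorem count_words_e_spec : Claim_equal_count_words_e := by
  intro text _
  show count_words_e text = count_words_e_alt text
  have hB : count_words_e_alt text
      = pvClose (((text.toList.filter (fun c => !PySem.Chars.isIn [c] pvPunct)).map
          PySem.Chars.lowerChar).foldl pvStepG ((0 : Int), false, false)) := by
    unfold count_words_e_alt pvClose
    rw [foldB_eq_foldG text.toList]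
  have hA : count_words_e text
      = pvCountE (PySem.Chars.split₀ ((text.toList.filter
          (fun c => !PySem.Chars.isIn [c] pvPunct)).map PySem.Chars.lowerChar)) := by
    unfold count_words_e remove_punctuation
    rw [PySem.List.foldl_append_if_eq_filter]
    simp only [List.nil_append, PySem.Str.split₀, PySem.Str.toList_lower,
      String.toList_ofList, PySem.Chars.lower]
    rw [List.foldl_map, foldl_count_if]
    simp only [pvCountE, zero_add, Nat.cast_inj]
    exact List.countP_congr (fun w _ => by simp [PySem.Str.isIn, isIn_singleton])
  have hgo := foldG_split ((text.toList.filter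
      (fun c => !PySem.Chars.isIn [c] pvPunct)).map PySem.Chars.lowerChar) [] []
  simp only [List.isEmpty_nil, Bool.not_true, List.contains_nil,
    (show pvCountE [] = (0 : Int) from rfl)] at hgo
  rw [hA, hB, PySem.Chars.split₀]
  exact hgo.symm
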